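-- pv_equiv track=rewrite | github.com/karhunenloeve/Homolipop | src/homolipop/simplices.py | group_by_dimension
-- ===== SOURCE A (Python) =====
-- from typing import Dict, Iterable, Iterator, List, Sequence, Tuple
--
-- Simplex = Tuple[int, ...]
--
-- def simplex_dim(simplex: Simplex) -> int:
--     return len(simplex) - 1
--
-- def group_by_dimension(simplices: Iterable[Simplex]) -> Dict[int, List[Simplex]]:
--     by_dim: Dict[int, List[Simplex]] = {}
--
--     for s in simplices:
--         if not s:
--             continue
--         by_dim.setdefault(simplex_dim(s), []).append(s)
--
--     for dim in by_dim:
--         by_dim[dim].sort()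
--
--     return dict(sorted(by_dim.items(), key=lambda item: item[0]))
-- ===== SOURCE B (Python) =====
-- from typing import Dict, Iterable, List, Tuple
--
-- Simplex = Tuple[int, ...]
--
-- def simplex_dim(simplex: Simplex) -> int:
--     return len(simplex) - 1
--
-- def group_by_dimension(simplices: Iterable[Simplex]) -> Dict[int, List[Simplex]]:
--     nonempty = [s for s in simplices if s]
--     dims = sorted({simplex_dim(s) for s in nonempty})
--     return {d: sorted(s for s in nonempty if simplex_dim(s) == d) for d in dims}
-- ===== Notes on version B (the rewrite author's own statement) =====
-- stated objective: simpler
-- what changed: Instead of accumulating a mutable dict of buckets, sorting each bucket in place and re-sorting the items, B collects the sorted distinct dimensions once and builds the result with a dict comprehension that filters and sorts the simplices of each dimension.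
import Mathlib
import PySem

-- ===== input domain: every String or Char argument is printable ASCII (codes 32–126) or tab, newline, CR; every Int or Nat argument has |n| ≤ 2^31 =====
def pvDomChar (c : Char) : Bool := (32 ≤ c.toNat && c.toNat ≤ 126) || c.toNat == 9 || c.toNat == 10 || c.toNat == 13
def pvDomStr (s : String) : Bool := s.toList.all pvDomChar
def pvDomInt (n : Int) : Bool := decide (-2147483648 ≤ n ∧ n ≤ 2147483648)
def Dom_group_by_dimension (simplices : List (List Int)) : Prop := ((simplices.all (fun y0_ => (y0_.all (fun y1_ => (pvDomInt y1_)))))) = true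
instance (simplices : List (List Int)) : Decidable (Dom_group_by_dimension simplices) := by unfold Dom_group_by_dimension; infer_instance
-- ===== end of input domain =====

-- B replaces A's mutable dict accumulation (+ per-bucket in-place sort + final item sort) by
-- collecting the sorted distinct dimensions once and building each bucket by filter-and-sort
-- (objective: simpler).

-- ===== PORT A =====
def simplex_dim (simplex : List Int) : Int := PySem.List.len simplex - 1

def group_by_dimension (simplices : List (List Int)) : List (Int × List (List Int)) :=
  -- 'by_dim.setdefault(dim, []).append(s)' mutates the bucket list in place; on the Dict model
  -- this is exactly 'modify dim [] (· ++ [s])' (insert-or-update, keeping the key's position).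
  let by_dim : PySem.Dict Int (List (List Int)) :=
    simplices.foldl (fun d s =>
      if s.isEmpty then d
      else d.modify (simplex_dim s) [] (fun v => v ++ [s])) PySem.Dict.empty
  -- 'for dim in by_dim: by_dim[dim].sort()' (in-place sort of each bucket)
  let by_dim2 : PySem.Dict Int (List (List Int)) :=
    by_dim.keys.foldl
      (fun d dim => d.modify dim [] (fun v => PySem.List.sorted v (fun x => x) false)) by_dim
  (PySem.Dict.ofList (PySem.List.sorted by_dim2.items (fun it => it.1) false)).items

-- ===== PORT B =====
def group_by_dimension_alt (simplices : List (List Int)) : List (Int × List (List Int)) :=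
  let nonempty := simplices.filter (fun s => !s.isEmpty)
  let dims := PySem.List.sorted (PySem.Set.ofList (nonempty.map simplex_dim)) (fun x => x) false
  dims.map (fun d =>
    (d, PySem.List.sorted (nonempty.filter (fun s => simplex_dim s == d)) (fun x => x) false))

-- ===== PRECONDITION & SPEC =====
def Spec_group_by_dimension (simplices : List (List Int)) (out : List (Int × List (List Int))) : Prop := out = group_by_dimension_alt simplices
instance (simplices : List (List Int)) (out : List (Int × List (List Int))) : Decidable (Spec_group_by_dimension simplices out) := by unfold Spec_group_by_dimension; infer_instance

-- ===== CLAIM (what is proved, stated in full; the proofs are below) =====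
def Claim_equal_group_by_dimension : Prop := ∀ (simplices : List (List Int)), Dom_group_by_dimension simplices → Spec_group_by_dimension simplices (group_by_dimension simplices)

-- ===== LEMMAS AND PROOFS =====

-- skipping the empty simplices in A's first loop = folding over the filtered list
lemma foldl_skip_empty (l : List (List Int)) (f : PySem.Dict Int (List (List Int)) → List Int → PySem.Dict Int (List (List Int))) (init : PySem.Dict Int (List (List Int))) :
    l.foldl (fun d s => if s.isEmpty then d else f d s) init
      = (l.filter (fun s => !s.isEmpty)).foldl f init := by
  rw [← PySem.List.foldl_if_eq_foldl_filter (fun s => !s.isEmpty) f l init]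
  exact PySem.List.foldl_congr_mem l _ _ init (by
    intro acc x _
    cases x.isEmpty <;> rfl)

-- a Set.update that adds nothing new is the identity
lemma set_update_of_subset (xs s : List Int) (h : ∀ x ∈ xs, x ∈ s) : PySem.Set.update s xs = s := by
  induction xs generalizing s with
  | nil => rfl
  | cons x xs ih =>
    have hx : PySem.Set.add s x = s := PySem.Set.add_of_mem (h x (by simp))
    show List.foldl PySem.Set.add s (x :: xs) = s
    simpa [hx] using ih s (fun y hy => h y (by simp [hy]))

-- the bucket-sorting fold: keys not in the list are untouched
lemma foldl_modify_getD_not_mem (g : List (List Int) → List (List Int)) (ks : List Int) (d : PySem.Dict Int (List (List Int))) (k : Int) (hk : k ∉ ks) :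
    (ks.foldl (fun d k' => d.modify k' [] g) d).getD k [] = d.getD k [] := by
  induction ks generalizing d with
  | nil => rfl
  | cons a ks ih =>
    have hka : k ≠ a := fun h => hk (h ▸ List.mem_cons_self)
    have hrest : k ∉ ks := fun h => hk (List.mem_cons_of_mem _ h)
    simp only [List.foldl_cons]
    rw [ih _ hrest, PySem.Dict.getD_modify]
    simp [hka]

-- the bucket-sorting fold applies g exactly once to each listed key
lemma foldl_modify_getD_mem (g : List (List Int) → List (List Int)) (ks : List Int) (d : PySem.Dict Int (List (List Int))) (k : Int) (hnd : ks.Nodup) (hk : k ∈ ks) :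
    (ks.foldl (fun d k' => d.modify k' [] g) d).getD k [] = g (d.getD k []) := by
  induction ks generalizing d with
  | nil => cases hk
  | cons a ks ih =>
    simp only [List.foldl_cons]
    rcases List.mem_cons.mp hk with h | h
    · subst h
      have : k ∉ ks := (List.nodup_cons.mp hnd).1
      rw [foldl_modify_getD_not_mem g ks _ k this, PySem.Dict.getD_modify]
      simp
    · have hka : k ≠ a := fun he => (List.nodup_cons.mp hnd).1 (he ▸ h)
      rw [ih _ (List.nodup_cons.mp hnd).2 h, PySem.Dict.getD_modify]
      simp [hka]

-- A computes the canonical grouped form, which is B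
theorem group_by_dimension_spec : Claim_equal_group_by_dimension := by
  intro simplices _
  show group_by_dimension simplices = group_by_dimension_alt simplices
  simp only [group_by_dimension, group_by_dimension_alt]
  set ne := simplices.filter (fun s => !s.isEmpty) with hne
  set dims0 : List Int := PySem.Set.ofList (ne.map simplex_dim) with hdims0
  set dims : List Int := PySem.List.sorted dims0 (fun x => x) false with hdims
  set by_dim := simplices.foldl (fun d s => if s.isEmpty then d
        else d.modify (simplex_dim s) [] (fun v => v ++ [s])) PySem.Dict.empty with hbd
  -- the first loop, over the filtered list and in pair form
  have hA1 : by_dim = (ne.map (fun s => (simplex_dim s, s))).foldl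
          (fun d p => d.modify p.1 [] (fun v => v ++ [p.2])) PySem.Dict.empty := by
    rw [hbd, foldl_skip_empty, List.foldl_map]
  -- its buckets
  have hgetD : ∀ k, by_dim.getD k [] = ne.filter (fun s => simplex_dim s == k) := by
    intro k
    rw [hA1, PySem.Dict.getD_foldl_modify_append]
    simp [PySem.Dict.getD_empty, List.filter_map, Function.comp_def]
  -- its keys: the distinct dimensions, in first-occurrence order
  have hkeys : by_dim.keys = dims0 := by
    rw [hA1, PySem.Dict.keys_foldl_modify_key _ Prod.fst [] (fun _ p => (fun v => v ++ [p.2]))]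
    simp only [PySem.Dict.keys_empty, List.map_map, Function.comp_def]
    rfl
  have hnd0 : dims0.Nodup := hdims0 ▸ PySem.Set.nodup_ofList _
  set by_dim2 := by_dim.keys.foldl
      (fun d dim => d.modify dim [] (fun v => PySem.List.sorted v (fun x => x) false)) by_dim with hbd2
  -- the second loop does not change the key list
  have hkeys2 : by_dim2.keys = dims0 := by
    rw [hbd2, PySem.Dict.keys_foldl_modify_key _ (fun k => k) []
      (fun _ k => (fun v => PySem.List.sorted v (fun x => x) false)), hkeys]
    simp only [List.map_id']
    exact set_update_of_subset dims0 dims0 (fun x hx => hx)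
  -- and it sorts each bucket
  have hgetD2 : ∀ k ∈ dims0, by_dim2.getD k []
      = PySem.List.sorted (ne.filter (fun s => simplex_dim s == k)) (fun x => x) false := by
    intro k hkmem
    rw [hbd2, hkeys, foldl_modify_getD_mem _ _ _ _ hnd0 hkmem, hgetD]
  -- the items of the dict after bucket sorting
  have hitems2 : by_dim2.items = dims0.map (fun k =>
      (k, PySem.List.sorted (ne.filter (fun s => simplex_dim s == k)) (fun x => x) false)) := by
    rw [PySem.Dict.items_eq_map_keys by_dim2 (hkeys2 ▸ hnd0) [], hkeys2]
    exact List.map_congr_left (fun k hk => by rw [hgetD2 k hk])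
  -- sorting the items by key yields the map over the sorted distinct dimensions
  have hsorted : PySem.List.sorted by_dim2.items (fun it => it.1) false
      = dims.map (fun k =>
          (k, PySem.List.sorted (ne.filter (fun s => simplex_dim s == k)) (fun x => x) false)) := by
    apply PySem.List.sorted_eq_of_perm_of_pairwise_lt
    · rw [hitems2]
      exact (PySem.List.sorted_perm dims0 (fun x => x) false).map _
    · have := PySem.List.sorted_ofList_pairwise_lt (κ := Int) (ne.map simplex_dim)
      rw [← hdims0, ← hdims] at this
      exact this.map _ (by intro a b h; simpa using h)
  have hnd : dims.Nodup := ((PySem.List.sorted_perm dims0 (fun x => x) false).nodup_iff).mpr hnd0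
  -- dict() of an assoc list with distinct keys keeps it as is
  rw [hsorted]
  show (PySem.Dict.ofList _).items = _
  unfold PySem.Dict.ofList PySem.Dict.update
  rw [PySem.Dict.items_foldl_insert_fresh _ Prod.fst Prod.snd PySem.Dict.empty
    (fun a _ => PySem.Dict.contains_empty _) (by simpa [List.map_map, Function.comp_def] using hnd)]
  simp [PySem.Dict.empty]
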